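-- pv_equiv track=rewrite | github.com/lyq1119/dsa | lt/1292 Maximum Side Length of a Square with Sum Less than or Equal to Threshold.py | maxSideLength
-- ===== SOURCE A (Python) =====
-- def maxSideLength(mat, threshold: int) -> int:
--     grid = mat
--     m,n = len(grid),len(grid[0])
--     t = min(m,n)
--     qianzhuihe = [[0]*(n+1) for _ in range(m+1)]
--     for i in range(1,m+1):
--         for j in range(1,n+1):
--             qianzhuihe[i][j] = qianzhuihe[i][j-1] + sum([grid[k][j-1] for k in range(i)])
--     def check(s,i,j):
--         total = qianzhuihe[i+s][j+s] - qianzhuihe[i+s][j] - qianzhuihe[i][j+s] + qianzhuihe[i][j]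
--         return total
--     for s in range(t,0,-1):
--         mymin = float("inf")
--         for i in range(m-s+1):
--             for j in range(n-s+1):
--                 mymin = min(check(s,i,j),mymin)
--         if mymin <= threshold:
--             return s
--     return 0
-- ===== SOURCE B (Python) =====
-- def maxSideLength(mat, threshold: int) -> int:
--     m, n = len(mat), len(mat[0])
--     # proper O(1)-recurrence 2D prefix sums, built in one pass
--     P = [[0] * (n + 1) for _ in range(m + 1)]
--     for i in range(1, m + 1):
--         row = mat[i - 1]
--         for j in range(1, n + 1):
--             P[i][j] = P[i - 1][j] + P[i][j - 1] - P[i - 1][j - 1] + row[j - 1]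
--
--     def ok(s):
--         return any(P[i + s][j + s] - P[i + s][j] - P[i][j + s] + P[i][j] <= threshold
--                    for i in range(m - s + 1) for j in range(n - s + 1))
--
--     ans = 0
--     for s in range(1, min(m, n) + 1):
--         if ok(s):
--             ans = s
--     return ans
-- ===== Notes on version B (the rewrite author's own statement) =====
-- stated objective: faster
-- what changed: B builds the 2D prefix-sum table with the standard O(1) inclusion-exclusion recurrence in one pass (A re-sums a whole column for every cell, an O(m^2*n) build) and finds the answer by an ascending scan keeping the best side with a short-circuiting any-test, instead of A's descending scan that computes the full minimum over all positions before comparing.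
import Mathlib
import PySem

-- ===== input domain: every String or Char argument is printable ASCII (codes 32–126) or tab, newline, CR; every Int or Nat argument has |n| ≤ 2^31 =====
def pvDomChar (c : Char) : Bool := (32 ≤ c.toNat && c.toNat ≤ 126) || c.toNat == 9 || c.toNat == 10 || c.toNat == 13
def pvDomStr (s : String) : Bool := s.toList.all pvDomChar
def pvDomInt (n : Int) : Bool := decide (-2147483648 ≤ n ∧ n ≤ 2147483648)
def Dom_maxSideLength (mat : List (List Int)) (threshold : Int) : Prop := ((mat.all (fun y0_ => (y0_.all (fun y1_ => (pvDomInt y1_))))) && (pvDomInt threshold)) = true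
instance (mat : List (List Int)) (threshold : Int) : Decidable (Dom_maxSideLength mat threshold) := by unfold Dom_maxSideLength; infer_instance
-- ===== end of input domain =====

-- B replaces A's per-cell column re-summation by the standard one-pass O(1)-recurrence
-- prefix-sum build, and A's descending full-minimum scan by an ascending best-so-far
-- scan with a short-circuiting any-test; objective: faster (constant factor, measured).

-- ===== PORT A =====
-- sum([grid[k][j-1] for k in range(i)])  (indices in range under Pre_)
def pvColSum (mat : List (List Int)) (i c : Nat) : Int :=
  ((List.range i).map (fun k => (mat.getD k []).getD c 0)).sum

-- qianzhuihe[i][j] = qianzhuihe[i][j-1] + column sum; row i depends only on itself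
def pvQA (mat : List (List Int)) (i : Nat) : Nat → Int
  | 0 => 0
  | j + 1 => pvQA mat i j + pvColSum mat i j

-- def check(s,i,j)
def pvCheckA (mat : List (List Int)) (s i j : Nat) : Int :=
  pvQA mat (i + s) (j + s) - pvQA mat (i + s) j - pvQA mat i (j + s) + pvQA mat i j

-- mymin = min(check(s,i,j), mymin), starting from float("inf") (modelled as none)
def pvMinStep : Option Int → Int → Option Int
  | none, v => some v
  | some a, v => some (min v a)

-- the check values in the order A's i/j loops visit them
def pvValsA (mat : List (List Int)) (m n s : Nat) : List Int :=
  (List.range (m - s + 1)).flatMap (fun i =>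
    (List.range (n - s + 1)).map (fun j => pvCheckA mat s i j))

-- for s in range(t,0,-1): … if mymin <= threshold: return s;  return 0
def pvLoopA (mat : List (List Int)) (threshold : Int) (m n : Nat) : Nat → Int
  | 0 => 0
  | s + 1 =>
    match (pvValsA mat m n (s + 1)).foldl pvMinStep none with
    | some v => if v ≤ threshold then ((s + 1 : Nat) : Int) else pvLoopA mat threshold m n s
    | none => pvLoopA mat threshold m n s

def maxSideLength (mat : List (List Int)) (threshold : Int) : Int :=
  let m := mat.length
  let n := (mat.getD 0 []).length
  pvLoopA mat threshold m n (min m n)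

-- ===== PORT B =====
-- P[i][j] = P[i-1][j] + P[i][j-1] - P[i-1][j-1] + row[j-1], borders 0
def pvPB (mat : List (List Int)) : Nat → Nat → Int
  | 0, _ => 0
  | _ + 1, 0 => 0
  | i + 1, j + 1 =>
      pvPB mat i (j + 1) + pvPB mat (i + 1) j - pvPB mat i j + (mat.getD i []).getD j 0

-- def ok(s): any(... <= threshold for i … for j …)
def pvOkB (mat : List (List Int)) (threshold : Int) (m n s : Nat) : Bool :=
  ((List.range (m - s + 1)).flatMap (fun i =>
    (List.range (n - s + 1)).map (fun j =>
      pvPB mat (i + s) (j + s) - pvPB mat (i + s) j - pvPB mat i (j + s) + pvPB mat i j))).any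
    (fun v => v ≤ threshold)

-- ans = 0; for s in range(1, min(m,n)+1): if ok(s): ans = s; return ans
def maxSideLength_alt (mat : List (List Int)) (threshold : Int) : Int :=
  let m := mat.length
  let n := (mat.getD 0 []).length
  ((List.range (min m n)).map (fun k => k + 1)).foldl
    (fun ans s => if pvOkB mat threshold m n s then ((s : Nat) : Int) else ans) 0

-- ===== PRECONDITION & SPEC =====
-- Pre_ excludes exactly the inputs where A raises IndexError: an empty matrix
-- (len(grid[0])) and rows shorter than the first row (grid[k][j-1]); B raises there too.
def Pre_maxSideLength (mat : List (List Int)) (threshold : Int) : Prop :=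
  mat ≠ [] ∧ ∀ row ∈ mat, (mat.headD []).length ≤ row.length
instance (mat : List (List Int)) (threshold : Int) : Decidable (Pre_maxSideLength mat threshold) := by
  unfold Pre_maxSideLength; infer_instance

def pvWitness_maxSideLength : List (List Int) × Int := ([[1, 2], [3, 4]], 3)

def Spec_maxSideLength (mat : List (List Int)) (threshold : Int) (out : Int) : Prop := out = maxSideLength_alt mat threshold
instance (mat : List (List Int)) (threshold : Int) (out : Int) : Decidable (Spec_maxSideLength mat threshold out) := by unfold Spec_maxSideLength; infer_instance

-- ===== CLAIM (what is proved, stated in full; the proofs are below) =====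
def Claim_equal_maxSideLength : Prop := ∀ (mat : List (List Int)) (threshold : Int), Dom_maxSideLength mat threshold → Pre_maxSideLength mat threshold → Spec_maxSideLength mat threshold (maxSideLength mat threshold)

-- ===== LEMMAS AND PROOFS =====

-- mathematical double prefix sum both tables compute
def pvSrow (mat : List (List Int)) (k j : Nat) : Int :=
  ((List.range j).map (fun l => (mat.getD k []).getD l 0)).sum

def pvS (mat : List (List Int)) (i j : Nat) : Int :=
  ((List.range i).map (fun k => pvSrow mat k j)).sum

lemma pvSrow_succ (mat : List (List Int)) (k j : Nat) :
    pvSrow mat k (j + 1) = pvSrow mat k j + (mat.getD k []).getD j 0 := by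
  simp [pvSrow, List.range_succ]

lemma pvS_succ_left (mat : List (List Int)) (i j : Nat) :
    pvS mat (i + 1) j = pvS mat i j + pvSrow mat i j := by
  simp [pvS, List.range_succ]

lemma pvColSum_succ (mat : List (List Int)) (i c : Nat) :
    pvColSum mat (i + 1) c = pvColSum mat i c + (mat.getD i []).getD c 0 := by
  simp [pvColSum, List.range_succ]

lemma pvS_succ_right (mat : List (List Int)) (i j : Nat) :
    pvS mat i (j + 1) = pvS mat i j + pvColSum mat i j := by
  induction i with
  | zero => simp [pvS, pvColSum]
  | succ i ih =>
      rw [pvS_succ_left, pvS_succ_left, ih, pvSrow_succ, pvColSum_succ]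
      ring

lemma pvQA_eq (mat : List (List Int)) (i j : Nat) : pvQA mat i j = pvS mat i j := by
  induction j with
  | zero => simp [pvQA, pvS, pvSrow]
  | succ j ih => rw [pvQA, ih, pvS_succ_right]

lemma pvPB_eq (mat : List (List Int)) (i j : Nat) : pvPB mat i j = pvS mat i j := by
  induction i, j using pvPB.induct with
  | case1 j => simp [pvPB, pvS]
  | case2 i => simp [pvPB, pvS, pvSrow]
  | case3 i j ih1 ih2 ih3 =>
      rw [pvPB, ih1, ih2, ih3, pvS_succ_left, pvS_succ_left, pvSrow_succ]
      ring

lemma pvOkB_eq_any (mat : List (List Int)) (threshold : Int) (m n s : Nat) :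
    pvOkB mat threshold m n s = (pvValsA mat m n s).any (fun v => v ≤ threshold) := by
  simp [pvOkB, pvValsA, pvCheckA, pvQA_eq, pvPB_eq]

lemma foldl_minstep_some (l : List Int) : ∀ a : Int,
    l.foldl pvMinStep (some a) = some (l.foldl (fun x y => min y x) a) := by
  induction l with
  | nil => intro a; rfl
  | cons v tl ih => intro a; simpa [pvMinStep] using ih (min v a)

lemma foldl_min_le_iff (threshold : Int) (l : List Int) : ∀ a : Int,
    (l.foldl (fun x y => min y x) a ≤ threshold ↔
      a ≤ threshold ∨ l.any (fun v => v ≤ threshold) = true) := by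
  induction l with
  | nil => intro a; simp
  | cons v tl ih =>
      intro a
      simp only [List.foldl_cons, List.any_cons, ih (min v a), min_le_iff]
      simp only [Bool.or_eq_true, decide_eq_true_eq]
      tauto

lemma pvLoopA_eq_fold (mat : List (List Int)) (threshold : Int) (m n : Nat) : ∀ t : Nat,
    pvLoopA mat threshold m n t =
      ((List.range t).map (fun k => k + 1)).foldl
        (fun ans s => if pvOkB mat threshold m n s then ((s : Nat) : Int) else ans) 0 := by
  intro t
  induction t with
  | zero => rfl
  | succ t ih =>
      rw [List.range_succ, List.map_append, List.foldl_append, ← ih]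
      show pvLoopA mat threshold m n (t + 1) =
        (if pvOkB mat threshold m n (t + 1) then ((t + 1 : Nat) : Int)
         else pvLoopA mat threshold m n t)
      rw [pvLoopA, pvOkB_eq_any]
      cases hv : pvValsA mat m n (t + 1) with
      | nil => simp
      | cons v tl =>
          simp only [List.foldl_cons, pvMinStep, foldl_minstep_some]
          have hiff := foldl_min_le_iff threshold tl v
          by_cases h : tl.foldl (fun x y => min y x) v ≤ threshold
          · rw [if_pos h]
            rcases hiff.mp h with h1 | h1 <;> simp [h1]
          · rw [if_neg h]
            have h1 : ¬ v ≤ threshold := fun hx => h (hiff.mpr (Or.inl hx))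
            have h2 : ¬ tl.any (fun v => v ≤ threshold) = true :=
              fun hx => h (hiff.mpr (Or.inr hx))
            simp [h1, h2]

-- ===== VERDICT (by name: the statement is the Claim_ definition above) =====
theorem maxSideLength_spec : Claim_equal_maxSideLength := by
  intro mat threshold _ _
  unfold Spec_maxSideLength maxSideLength maxSideLength_alt
  exact pvLoopA_eq_fold mat threshold mat.length (mat.getD 0 []).length (min mat.length (mat.getD 0 []).length)
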